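-- pv_equiv track=rewrite | github.com/bog-walk/project-euler-python | solution/batch5/problem54.py | normalise_count
-- ===== SOURCE A (Python) =====
-- def normalise_count(values: tuple[str]) -> list[int]:
--     """
--     Normalises card values to range from 1 to 14 & counts the amount of
--     each card in the hand. Note that Ace cards are counted as both high & low.
--
--     :returns: List of card counts with card value == index.
--         e.g. [0, 0, 0, 0, 0, 2, 1, 1, 0, 0, 0, 0, 0, 1, 0] represents a hand with
--         2 fives, 1 six, 1 seven, and 1 King.
--     """
--
--     non_nums = ["T", "J", "Q", "K", "A"]
--     count = [0]*15
--     for value in values: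
--         num = ord(value) - 48 if value < ":" else 10 + non_nums.index(value)
--         count[num] += 1
--         if num == 14:  # count Ace as a high or low card
--             count[1] += 1
--     return count
-- ===== SOURCE B (Python) =====
-- _SYMBOLS = ["0", "1", "2", "3", "4", "5", "6", "7", "8", "9", "T", "J", "Q", "K", "A"]
--
--
-- def normalise_count(values):
--     # First pass: frequency table of the raw card symbols.
--     freq = {}
--     for value in values:
--         freq[value] = freq.get(value, 0) + 1
--     # Second pass: distribute each DISTINCT symbol's frequency to its slot.
--     count = [0] * 15
--     for sym, n in freq.items():
--         count[_SYMBOLS.index(sym)] = n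
--     # Ace counts low as well as high.
--     count[1] += count[14]
--     return count
-- ===== Notes on version B (the rewrite author's own statement) =====
-- stated objective: alternative
-- what changed: B replaces A's per-card increment loop with a count-then-distribute scheme: one pass builds a frequency table of raw symbols, a second pass over the DISTINCT symbols translates each to its slot via a fixed symbol table and writes its frequency, with the Ace-low fix-up done once at the end.
-- outside the precondition, e.g. on normalise_count(('!',)): A returns [1, 0, 0, 0, 0, 0, 0, 0, 0, 0, 0, 0, 0, 0, 0], B raises ValueError
import Mathlib
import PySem

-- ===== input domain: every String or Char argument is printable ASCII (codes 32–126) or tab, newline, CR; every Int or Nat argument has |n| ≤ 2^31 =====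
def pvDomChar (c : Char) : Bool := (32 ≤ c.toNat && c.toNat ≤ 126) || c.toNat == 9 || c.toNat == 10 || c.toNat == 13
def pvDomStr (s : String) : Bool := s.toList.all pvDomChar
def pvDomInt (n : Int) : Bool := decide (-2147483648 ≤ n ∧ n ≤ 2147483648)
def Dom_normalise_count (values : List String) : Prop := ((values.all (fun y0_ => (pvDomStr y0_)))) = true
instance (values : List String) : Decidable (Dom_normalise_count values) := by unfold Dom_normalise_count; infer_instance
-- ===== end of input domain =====

-- B re-implements A by count-then-distribute: one pass builds a frequency table of the raw symbols,
-- a second pass over the DISTINCT symbols writes each frequency to its slot (objective: alternative).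


-- ===== PORT A =====
-- ord(value): exact on single-character strings (Pre_ guarantees these); default outside.
def pyOrdD (s : String) (d : Int) : Int :=
  match s.toList with
  | [c] => (c.toNat : Int)
  | _ => d

def nonNumsA : List String := ["T", "J", "Q", "K", "A"]

-- the body of A's 'for value in values' loop
def stepA (count : List Int) (value : String) : List Int :=
  let num : Int :=
    if value < ":" then pyOrdD value 0 - 48
    else 10 + (((PySem.List.index? nonNumsA value).getD 0 : Nat) : Int)
  let count := PySem.List.pySetD count num (PySem.List.pyGetD count num 0 + 1)
  if num == 14 then PySem.List.pySetD count 1 (PySem.List.pyGetD count 1 0 + 1) else count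

def normalise_count (values : List String) : List Int :=
  values.foldl stepA (List.replicate 15 0)

-- ===== PORT B =====
def symbolsB : List String := ["0", "1", "2", "3", "4", "5", "6", "7", "8", "9", "T", "J", "Q", "K", "A"]

-- _SYMBOLS.index(sym): exact where sym ∈ _SYMBOLS (Pre_ guarantees this); default outside.
def normalise_count_alt (values : List String) : List Int :=
  let freq : PySem.Dict String Int :=
    values.foldl (fun d v => d.insert v (d.getD v 0 + 1)) PySem.Dict.empty
  let count : List Int :=
    freq.items.foldl
      (fun count p =>
        PySem.List.pySetD count (((PySem.List.index? symbolsB p.1).getD 0 : Nat) : Int) p.2)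
      (List.replicate 15 0)
  PySem.List.pySetD count 1 (PySem.List.pyGetD count 1 0 + PySem.List.pyGetD count 14 0)

-- ===== PRECONDITION & SPEC =====
-- Pre_ admits exactly the hands made of the 15 valid card symbols "0".."9","T","J","Q","K","A";
-- it excludes every other string: there A raises (TypeError from ord on a non-single-character
-- string, ValueError from list.index on an unknown character) or, for a single character with
-- code 33..47, returns an accidental list via Python's negative-index wraparound — B raises
-- ValueError on all of them.
def Pre_normalise_count (values : List String) : Prop := ∀ v ∈ values, v ∈ symbolsB
instance (values : List String) : Decidable (Pre_normalise_count values) := by unfold Pre_normalise_count; infer_instance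

def pvWitness_normalise_count : List String := ["A", "7", "7", "K", "2"]

def Spec_normalise_count (values : List String) (out : List Int) : Prop := out = normalise_count_alt values
instance (values : List String) (out : List Int) : Decidable (Spec_normalise_count values out) := by unfold Spec_normalise_count; infer_instance

-- ===== CLAIM (what is proved, stated in full; the proofs are below) =====
def Claim_equal_normalise_count : Prop := ∀ (values : List String), Dom_normalise_count values → Pre_normalise_count values → Spec_normalise_count values (normalise_count values)

-- ===== LEMMAS AND PROOFS =====

-- the common reference value: per-symbol counts, with Ace also counted low at index 1
def refCount (values : List String) : List Int :=
  [(values.count "0" : Int),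
   (values.count "1" : Int) + (values.count "A" : Int),
   (values.count "2" : Int), (values.count "3" : Int), (values.count "4" : Int),
   (values.count "5" : Int), (values.count "6" : Int), (values.count "7" : Int),
   (values.count "8" : Int), (values.count "9" : Int), (values.count "T" : Int),
   (values.count "J" : Int), (values.count "Q" : Int), (values.count "K" : Int),
   (values.count "A" : Int)]

theorem A_eq_ref (values : List String) (h : ∀ v ∈ values, v ∈ symbolsB) :
    normalise_count values = refCount values := by
  induction values using List.reverseRecOn with
  | nil => rfl
  | append_singleton vs v ih =>
    have hv : v ∈ symbolsB := h v (by simp)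
    have ihr := ih (fun w hw => h w (by simp [hw]))
    unfold normalise_count at ihr ⊢
    rw [List.foldl_append, List.foldl_cons, List.foldl_nil, ihr]
    simp only [symbolsB, List.mem_cons, List.not_mem_nil, or_false] at hv
    rcases hv with rfl | rfl | rfl | rfl | rfl | rfl | rfl | rfl | rfl | rfl | rfl | rfl | rfl | rfl | rfl
    · simp [stepA, refCount, pyOrdD, PySem.List.pySetD, PySem.List.pySet?, PySem.List.pyGetD,
        PySem.List.pyGet?, PySem.List.pyIdx?, List.count_append,
        show (['0'] : List Char) < [':'] from by decide]
    · simp [stepA, refCount, pyOrdD, PySem.List.pySetD, PySem.List.pySet?, PySem.List.pyGetD,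
        PySem.List.pyGet?, PySem.List.pyIdx?, List.count_append,
        show (['1'] : List Char) < [':'] from by decide]
      ring
    · simp [stepA, refCount, pyOrdD, PySem.List.pySetD, PySem.List.pySet?, PySem.List.pyGetD,
        PySem.List.pyGet?, PySem.List.pyIdx?, List.count_append,
        show (['2'] : List Char) < [':'] from by decide]
    · simp [stepA, refCount, pyOrdD, PySem.List.pySetD, PySem.List.pySet?, PySem.List.pyGetD,
        PySem.List.pyGet?, PySem.List.pyIdx?, List.count_append,
        show (['3'] : List Char) < [':'] from by decide]
    · simp [stepA, refCount, pyOrdD, PySem.List.pySetD, PySem.List.pySet?, PySem.List.pyGetD,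
        PySem.List.pyGet?, PySem.List.pyIdx?, List.count_append,
        show (['4'] : List Char) < [':'] from by decide]
    · simp [stepA, refCount, pyOrdD, PySem.List.pySetD, PySem.List.pySet?, PySem.List.pyGetD,
        PySem.List.pyGet?, PySem.List.pyIdx?, List.count_append,
        show (['5'] : List Char) < [':'] from by decide]
    · simp [stepA, refCount, pyOrdD, PySem.List.pySetD, PySem.List.pySet?, PySem.List.pyGetD,
        PySem.List.pyGet?, PySem.List.pyIdx?, List.count_append,
        show (['6'] : List Char) < [':'] from by decide]
    · simp [stepA, refCount, pyOrdD, PySem.List.pySetD, PySem.List.pySet?, PySem.List.pyGetD,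
        PySem.List.pyGet?, PySem.List.pyIdx?, List.count_append,
        show (['7'] : List Char) < [':'] from by decide]
    · simp [stepA, refCount, pyOrdD, PySem.List.pySetD, PySem.List.pySet?, PySem.List.pyGetD,
        PySem.List.pyGet?, PySem.List.pyIdx?, List.count_append,
        show (['8'] : List Char) < [':'] from by decide]
    · simp [stepA, refCount, pyOrdD, PySem.List.pySetD, PySem.List.pySet?, PySem.List.pyGetD,
        PySem.List.pyGet?, PySem.List.pyIdx?, List.count_append,
        show (['9'] : List Char) < [':'] from by decide]
    · simp [stepA, refCount, nonNumsA, PySem.List.pySetD, PySem.List.pySet?, PySem.List.pyGetD,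
        PySem.List.pyGet?, PySem.List.pyIdx?, List.count_append,
        show ¬ (['T'] : List Char) < [':'] from by decide,
        show List.idxOf? "T" ["T", "J", "Q", "K", "A"] = some 0 from by decide]
    · simp [stepA, refCount, nonNumsA, PySem.List.pySetD, PySem.List.pySet?, PySem.List.pyGetD,
        PySem.List.pyGet?, PySem.List.pyIdx?, List.count_append,
        show ¬ (['J'] : List Char) < [':'] from by decide,
        show List.idxOf? "J" ["T", "J", "Q", "K", "A"] = some 1 from by decide]
    · simp [stepA, refCount, nonNumsA, PySem.List.pySetD, PySem.List.pySet?, PySem.List.pyGetD,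
        PySem.List.pyGet?, PySem.List.pyIdx?, List.count_append,
        show ¬ (['Q'] : List Char) < [':'] from by decide,
        show List.idxOf? "Q" ["T", "J", "Q", "K", "A"] = some 2 from by decide]
    · simp [stepA, refCount, nonNumsA, PySem.List.pySetD, PySem.List.pySet?, PySem.List.pyGetD,
        PySem.List.pyGet?, PySem.List.pyIdx?, List.count_append,
        show ¬ (['K'] : List Char) < [':'] from by decide,
        show List.idxOf? "K" ["T", "J", "Q", "K", "A"] = some 3 from by decide]
    · simp [stepA, refCount, nonNumsA, PySem.List.pySetD, PySem.List.pySet?, PySem.List.pyGetD,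
        PySem.List.pyGet?, PySem.List.pyIdx?, List.count_append,
        show ¬ (['A'] : List Char) < [':'] from by decide,
        show List.idxOf? "A" ["T", "J", "Q", "K", "A"] = some 4 from by decide]
      ring

-- B's distribution loop over distinct symbols, characterised entrywise
theorem pvDistLoop_inv (c : String → Int) :
    ∀ (ds : List String), ds.Nodup → (∀ s ∈ ds, s ∈ symbolsB) →
    ∀ (cnt : List Int), cnt.length = 15 →
      ((ds.map (fun k => (k, c k))).foldl
          (fun acc p =>
            PySem.List.pySetD acc (((PySem.List.index? symbolsB p.1).getD 0 : Nat) : Int) p.2)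
          cnt).length = 15 ∧
      ∀ i : Nat, i < 15 →
        ((ds.map (fun k => (k, c k))).foldl
            (fun acc p =>
              PySem.List.pySetD acc (((PySem.List.index? symbolsB p.1).getD 0 : Nat) : Int) p.2)
            cnt).getD i 0
          = if symbolsB.getD i "" ∈ ds then c (symbolsB.getD i "") else cnt.getD i 0 := by
  intro ds
  induction ds with
  | nil => intro _ _ cnt hlen; simp [hlen]
  | cons d t ih =>
    intro hnd hsub cnt hlen
    have hd : d ∈ symbolsB := hsub d (List.mem_cons_self)
    obtain ⟨j, hj⟩ : ∃ j, PySem.List.index? symbolsB d = some j :=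
      Option.isSome_iff_exists.mp ((PySem.List.index?_isSome_iff symbolsB d).mpr hd)
    obtain ⟨hjlt, hjval, -⟩ := PySem.List.getElem_of_index?_eq_some hj
    have hlen15 : symbolsB.length = 15 := by decide
    simp only [List.map_cons, List.foldl_cons, hj, Option.getD_some]
    rw [PySem.List.pySetD_natCast]
    obtain ⟨ihlen, ihval⟩ := ih (List.nodup_cons.mp hnd).2
      (fun s hs => hsub s (List.mem_cons_of_mem d hs)) (cnt.set j (c d)) (by simp [hlen])
    refine ⟨ihlen, ?_⟩
    intro i hi
    rw [ihval i hi]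
    have hilt : i < symbolsB.length := by omega
    have hgd : symbolsB.getD i "" = symbolsB[i] := List.getD_eq_getElem _ _ hilt
    by_cases hmem : symbolsB.getD i "" ∈ t
    · rw [if_pos hmem, if_pos (List.mem_cons_of_mem d hmem)]
    · rw [if_neg hmem]
      by_cases heq : symbolsB.getD i "" = d
      · have hij : i = j := by
          have key : symbolsB[i]'hilt = symbolsB[j]'hjlt := by rw [← hgd, heq, hjval]
          exact (List.Nodup.getElem_inj_iff (by decide : symbolsB.Nodup)).mp key
        subst hij
        rw [if_pos (by rw [heq]; exact List.mem_cons_self), heq]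
        have hset : i < (cnt.set i (c d)).length := by simp [hlen]; omega
        rw [List.getD_eq_getElem _ _ hset]
        simp
      · have hij : i ≠ j := by
          intro hc
          apply heq
          subst hc
          rw [hgd]; exact hjval
        rw [if_neg (fun hc => ((List.mem_cons.mp hc).elim heq hmem))]
        have hset : i < (cnt.set j (c d)).length := by simp [hlen]; omega
        rw [List.getD_eq_getElem _ _ hset, List.getD_eq_getElem _ _ (by omega : i < cnt.length),
          List.getElem_set_ne (h := fun hc => hij hc.symm)]

theorem B_eq_ref (values : List String) (h : ∀ v ∈ values, v ∈ symbolsB) :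
    normalise_count_alt values = refCount values := by
  unfold normalise_count_alt
  simp only [PySem.Dict.foldl_insert_getD_add_one_eq_counter, PySem.Dict.items_counter]
  obtain ⟨hlen, hval⟩ := pvDistLoop_inv (fun k => ((values.count k : Nat) : Int))
    (PySem.Set.ofList values) (PySem.Set.nodup_ofList values)
    (fun s hs => h s ((PySem.Set.mem_ofList values s).mp hs))
    (List.replicate 15 0) (by simp)
  set res := ((PySem.Set.ofList values).map
      (fun k => (k, ((values.count k : Nat) : Int)))).foldl
      (fun acc p =>
        PySem.List.pySetD acc (((PySem.List.index? symbolsB p.1).getD 0 : Nat) : Int) p.2)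
      (List.replicate 15 (0 : Int)) with hres
  have hmid : res = [(values.count "0" : Int), (values.count "1" : Int),
      (values.count "2" : Int), (values.count "3" : Int), (values.count "4" : Int),
      (values.count "5" : Int), (values.count "6" : Int), (values.count "7" : Int),
      (values.count "8" : Int), (values.count "9" : Int), (values.count "T" : Int),
      (values.count "J" : Int), (values.count "Q" : Int), (values.count "K" : Int),
      (values.count "A" : Int)] := by
    apply List.ext_getElem (by rw [hlen]; rfl)
    intro i h1 h2
    have hi15 : i < 15 := by omega
    have := hval i hi15
    rw [List.getD_eq_getElem _ _ h1] at this
    rw [this]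
    interval_cases i <;>
      simp [symbolsB, List.getD] <;>
      (intro h0; simp [List.count_eq_zero.mpr h0])
  rw [hmid]
  simp [refCount, PySem.List.pySetD, PySem.List.pySet?, PySem.List.pyGetD, PySem.List.pyGet?,
    PySem.List.pyIdx?]

-- ===== VERDICT (by name: the statement is the Claim_ definition above) =====
theorem normalise_count_spec : Claim_equal_normalise_count := by
  intro values _ hpre
  unfold Spec_normalise_count
  rw [A_eq_ref values hpre, B_eq_ref values hpre]
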